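-- pv_equiv track=rewrite | github.com/laisuk/OpenccPurepyGui | pdf_module/reflow_helper.py | last_two_non_whitespace
-- ===== SOURCE A (Python) =====
-- from typing import List, Optional, Sequence, Tuple, Dict
--
-- def last_two_non_whitespace(s: str) -> Optional[Tuple[str, str]]:
--     """Return (last, prev) non-whitespace characters, or None if not enough."""
--     last = None
--
--     i = len(s) - 1
--     while i >= 0:
--         ch = s[i]
--         if not ch.isspace():
--             if last is None:
--                 last = ch
--             else:
--                 return last, ch  # (last, prev)
--         i -= 1
--
--     return None
-- ===== SOURCE B (Python) =====
-- def last_two_non_whitespace(s: str):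
--     """Return (last, prev) non-whitespace characters, or None if not enough."""
--     nw = [c for c in s if not c.isspace()]
--     if len(nw) < 2:
--         return None
--     return nw[-1], nw[-2]
-- ===== Notes on version B (the rewrite author's own statement) =====
-- stated objective: simpler
-- what changed: Replaces the backward early-exit scan that threads a single-character sentinel with a single forward pass that materializes all non-whitespace characters and indexes the last two from the end.
import Mathlib
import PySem

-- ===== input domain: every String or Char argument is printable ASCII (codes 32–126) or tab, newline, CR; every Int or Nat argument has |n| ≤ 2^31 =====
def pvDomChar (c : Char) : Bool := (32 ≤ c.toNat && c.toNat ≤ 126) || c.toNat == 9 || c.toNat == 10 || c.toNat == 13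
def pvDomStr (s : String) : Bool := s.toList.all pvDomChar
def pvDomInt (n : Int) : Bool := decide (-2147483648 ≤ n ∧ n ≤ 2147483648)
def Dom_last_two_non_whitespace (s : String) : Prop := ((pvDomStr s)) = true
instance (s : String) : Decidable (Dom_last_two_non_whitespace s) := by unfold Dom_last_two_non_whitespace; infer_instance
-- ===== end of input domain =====

-- ===== PORT A =====
-- B changes the decomposition: A scans backward with a single-character sentinel and exits early; B builds the full non-whitespace list forward and indexes it. Return values proved equal on Dom.
-- A's while-loop from i = len(s)-1 down to 0 is the structural recursion over the reversed character list, threading the 'last' sentinel.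
def lastTwoLoopA : List Char → Option Char → Option (String × String)
  | [], _ => none
  | ch :: rest, last =>
    if !(PySem.Chars.isspace ch) then
      match last with
      | none => lastTwoLoopA rest (some ch)
      | some l => some (String.ofList [l], String.ofList [ch])
    else
      lastTwoLoopA rest last

def last_two_non_whitespace (s : String) : Option (String × String) :=
  lastTwoLoopA s.toList.reverse none

-- ===== PORT B =====
def last_two_non_whitespace_alt (s : String) : Option (String × String) :=
  let nw := s.toList.filter (fun c => !(PySem.Chars.isspace c))
  if nw.length < 2 then none
  else
    match PySem.List.pyGet? nw (-1), PySem.List.pyGet? nw (-2) with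
    | some a, some b => some (String.ofList [a], String.ofList [b])
    | _, _ => none

-- ===== PRECONDITION & SPEC =====
def Spec_last_two_non_whitespace (s : String) (out : Option (String × String)) : Prop := out = last_two_non_whitespace_alt s
instance (s : String) (out : Option (String × String)) : Decidable (Spec_last_two_non_whitespace s out) := by unfold Spec_last_two_non_whitespace; infer_instance

-- ===== CLAIM (what is proved, stated in full; the proofs are below) =====
def Claim_equal_last_two_non_whitespace : Prop := ∀ (s : String), Dom_last_two_non_whitespace s → Spec_last_two_non_whitespace s (last_two_non_whitespace s)

-- ===== LEMMAS AND PROOFS =====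
theorem lastTwoLoopA_some (l : List Char) (x : Char) :
    lastTwoLoopA l (some x) =
      match l.filter (fun c => !(PySem.Chars.isspace c)) with
      | [] => none
      | c :: _ => some (String.ofList [x], String.ofList [c]) := by
  induction l with
  | nil => simp [lastTwoLoopA]
  | cons ch rest ih =>
    by_cases h : PySem.Chars.isspace ch
    · simp [lastTwoLoopA, List.filter, h, ih]
    · simp [lastTwoLoopA, List.filter, h]

theorem lastTwoLoopA_none (l : List Char) :
    lastTwoLoopA l none =
      match l.filter (fun c => !(PySem.Chars.isspace c)) with
      | a :: b :: _ => some (String.ofList [a], String.ofList [b])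
      | _ => none := by
  induction l with
  | nil => simp [lastTwoLoopA]
  | cons ch rest ih =>
    by_cases h : PySem.Chars.isspace ch
    · simp [lastTwoLoopA, List.filter, h, ih]
    · simp [lastTwoLoopA, List.filter, h, lastTwoLoopA_some]
      rcases hf : rest.filter (fun c => !(PySem.Chars.isspace c)) with _ | ⟨c, t⟩ <;> simp

theorem pyGet?_neg_two_append (xs : List Char) (b a : Char) :
    PySem.List.pyGet? (xs ++ [b, a]) (-2) = some b := by
  rw [show xs ++ [b, a] = (xs ++ [b]) ++ [a] by simp,
      PySem.List.pyGet?_neg_ofNat _ 2 (by omega) (by simp)]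
  simp

-- ===== VERDICT (by name: the statement is the Claim_ definition above) =====
theorem last_two_non_whitespace_spec : Claim_equal_last_two_non_whitespace := by
  intro s _
  unfold Spec_last_two_non_whitespace last_two_non_whitespace last_two_non_whitespace_alt
  rw [lastTwoLoopA_none, List.filter_reverse]
  rcases hm : (s.toList.filter (fun c => !(PySem.Chars.isspace c))).reverse with _ | ⟨a, _ | ⟨b, t⟩⟩ <;>
    have hnw : s.toList.filter (fun c => !(PySem.Chars.isspace c)) =
        ((s.toList.filter (fun c => !(PySem.Chars.isspace c))).reverse).reverse := by
      simp
  · rw [hm] at hnw; simp [hnw]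
  · rw [hm] at hnw; simp [hnw]
  · rw [hm] at hnw; simp only [hnw, List.reverse_cons]
    rw [List.append_assoc, List.singleton_append, pyGet?_neg_two_append,
      show t.reverse ++ [b, a] = (t.reverse ++ [b]) ++ [a] from by simp,
      PySem.List.pyGet?_neg_one_append_singleton]
    simp
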